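-- pv_equiv track=rewrite | github.com/donkrazy/SkCnc | solution2.py | solution
-- ===== SOURCE A (Python) =====
-- def solution(board, nums):
--     length = len(board)
--     check = [1] * length * 2
--     diag_1 = 1
--     diag_2 = 1
--
--     for i in range(length):
--         for j in range(length):
--             item = board[i][j]
--             if item in nums:
--                 continue
--
--             if i == j:
--                 diag_1 = 0
--             if i + j == length-1:
--                 diag_2 = 0
--
--             check[i] = 0
--             check[length+j] = 0
--
--     return sum(check) + diag_1 + diag_2
-- ===== SOURCE B (Python) =====
-- def solution(board, nums):
--     n = len(board)
--     rows = sum(1 for i in range(n) if all(board[i][j] in nums for j in range(n)))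
--     cols = sum(1 for j in range(n) if all(board[i][j] in nums for i in range(n)))
--     d1 = 1 if all(board[i][i] in nums for i in range(n)) else 0
--     d2 = 1 if all(board[i][n - 1 - i] in nums for i in range(n)) else 0
--     return rows + cols + d1 + d2
-- ===== Notes on version B (the rewrite author's own statement) =====
-- stated objective: idiomatic
-- what changed: Replaces A's single interleaved pass that mutates a packed 2n flag list plus two diagonal flags with four independent line scans (rows, columns, both diagonals) each tested directly with all(), summed at the end.
import Mathlib
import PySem

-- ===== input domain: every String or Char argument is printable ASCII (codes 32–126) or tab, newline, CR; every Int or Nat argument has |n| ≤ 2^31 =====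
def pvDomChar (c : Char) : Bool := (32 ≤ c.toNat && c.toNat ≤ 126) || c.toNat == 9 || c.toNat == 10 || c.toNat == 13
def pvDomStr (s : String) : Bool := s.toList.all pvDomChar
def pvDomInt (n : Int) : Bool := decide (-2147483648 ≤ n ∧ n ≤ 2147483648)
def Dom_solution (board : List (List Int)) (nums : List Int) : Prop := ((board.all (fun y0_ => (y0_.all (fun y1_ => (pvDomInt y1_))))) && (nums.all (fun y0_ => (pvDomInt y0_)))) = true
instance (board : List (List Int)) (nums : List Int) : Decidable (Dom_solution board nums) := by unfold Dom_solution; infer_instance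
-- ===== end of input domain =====

-- B replaces A's single interleaved pass over a packed 2n-flag list with four
-- independent line scans (rows, columns, both diagonals); same cost, plainer shape.

-- ===== PORT A =====
-- inner-loop body of A: one step for fixed row i, column j
def solStep (board : List (List Int)) (nums : List Int) (n i : Nat)
    (st : List Int × Int × Int) (j : Nat) : List Int × Int × Int :=
  let item := (board.getD i []).getD j 0   -- board[i][j]; in range under Pre_solution
  if nums.contains item then st
  else
    let d1 := if i = j then (0 : Int) else st.2.1
    let d2 := if i + j = n - 1 then (0 : Int) else st.2.2
    ((st.1.set i 0).set (n + j) 0, d1, d2)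

def solution (board : List (List Int)) (nums : List Int) : Int :=
  let n := board.length
  let st :=
    (List.range n).foldl
      (fun st i => (List.range n).foldl (solStep board nums n i) st)
      (List.replicate (2 * n) 1, 1, 1)
  st.1.sum + st.2.1 + st.2.2

-- ===== PORT B =====
def solution_alt (board : List (List Int)) (nums : List Int) : Int :=
  let n := board.length
  let cell : Nat → Nat → Int := fun i j => (board.getD i []).getD j 0
  ((List.range n).countP (fun i => (List.range n).all (fun j => nums.contains (cell i j))) : Int)
    + ((List.range n).countP (fun j => (List.range n).all (fun i => nums.contains (cell i j))) : Int)
    + (if (List.range n).all (fun i => nums.contains (cell i i)) then 1 else 0)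
    + (if (List.range n).all (fun i => nums.contains (cell i (n - 1 - i))) then 1 else 0)

-- ===== PRECONDITION & SPEC =====
-- Pre_ excludes exactly the boards on which the Python A raises IndexError:
-- some row shorter than the number of rows (board[i][j] out of range).
def Pre_solution (board : List (List Int)) (nums : List Int) : Prop :=
  ∀ row ∈ board, board.length ≤ row.length
instance (board : List (List Int)) (nums : List Int) : Decidable (Pre_solution board nums) := by
  unfold Pre_solution; infer_instance

def pvWitness_solution : List (List Int) × List Int := ([[1, 2], [3, 4]], [1, 2, 3])

def Spec_solution (board : List (List Int)) (nums : List Int) (out : Int) : Prop := out = solution_alt board nums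
instance (board : List (List Int)) (nums : List Int) (out : Int) : Decidable (Spec_solution board nums out) := by unfold Spec_solution; infer_instance

-- ===== CLAIM (what is proved, stated in full; the proofs are below) =====
def Claim_equal_solution : Prop := ∀ (board : List (List Int)) (nums : List Int), Dom_solution board nums → Pre_solution board nums → Spec_solution board nums (solution board nums)

-- ===== LEMMAS AND PROOFS =====

-- `bad i j` : board[i][j] not in nums
def pvBad (board : List (List Int)) (nums : List Int) (i j : Nat) : Bool :=
  !(nums.contains ((board.getD i []).getD j 0))

lemma map_range_set (L p : Nat) (g : Nat → Int) (v : Int) (_hp : p < L) :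
    ((List.range L).map g).set p v
      = (List.range L).map (fun t => if t = p then v else g t) := by
  apply List.ext_getElem
  · simp
  · intro k h1 h2
    simp only [List.getElem_set, List.getElem_map, List.getElem_range]
    simp at h1
    by_cases h : p = k <;> simp [h]
    · omega

lemma inner_char (board : List (List Int)) (nums : List Int) (n i : Nat) (hi : i < n)
    (g : Nat → Int) (d1 d2 : Int) (m : Nat) (hm : m ≤ n) :
    (List.range m).foldl (solStep board nums n i) ((List.range (2 * n)).map g, d1, d2)
      = ((List.range (2 * n)).map (fun t =>
            if t = i ∧ (List.range m).any (pvBad board nums i) then 0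
            else if n ≤ t ∧ t - n < m ∧ pvBad board nums i (t - n) then 0 else g t),
          (if i < m ∧ pvBad board nums i i then 0 else d1),
          (if n - 1 - i < m ∧ pvBad board nums i (n - 1 - i) then 0 else d2)) := by
  induction m with
  | zero => simp
  | succ m ih =>
    have hm' : m ≤ n := by omega
    rw [List.range_succ, List.foldl_append, ih hm']
    simp only [List.foldl_cons, List.foldl_nil]
    by_cases hb : pvBad board nums i m = true
    · have hc : nums.contains ((board.getD i []).getD m 0) = false := by
        unfold pvBad at hb; simpa using hb
      have hany : (List.range m ++ [m]).any (pvBad board nums i) = true := by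
        simp [hb]
      unfold solStep
      simp only [hc, Bool.false_eq_true, if_false]
      refine congrArg₂ _ ?_ (congrArg₂ _ ?_ ?_)
      · rw [map_range_set _ i _ _ (by omega), map_range_set _ (n + m) _ _ (by omega)]
        apply List.map_congr_left
        intro t ht
        simp only [List.mem_range] at ht
        by_cases h2 : t = i
        · have hL1 : ¬ (t = n + m) := by omega
          rw [if_neg hL1, if_pos h2, if_pos ⟨h2, hany⟩]
        · have hA : ¬ (t = i ∧ (List.range m ++ [m]).any (pvBad board nums i) = true) :=
            fun hco => h2 hco.1
          by_cases h1 : t = n + m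
          · have hB : n ≤ t ∧ t - n < m + 1 ∧ pvBad board nums i (t - n) = true :=
              ⟨by omega, by omega, by rw [show t - n = m by omega]; exact hb⟩
            rw [if_pos h1, if_neg hA, if_pos hB]
          · have hA' : ¬ (t = i ∧ (List.range m).any (pvBad board nums i) = true) :=
              fun hco => h2 hco.1
            rw [if_neg h1, if_neg h2, if_neg hA', if_neg hA]
            by_cases h3 : n ≤ t ∧ t - n < m ∧ pvBad board nums i (t - n) = true
            · have h4 : n ≤ t ∧ t - n < m + 1 ∧ pvBad board nums i (t - n) = true :=
                ⟨h3.1, by omega, h3.2.2⟩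
              rw [if_pos h3, if_pos h4]
            · have h4 : ¬ (n ≤ t ∧ t - n < m + 1 ∧ pvBad board nums i (t - n) = true) := by
                intro hco
                exact h3 ⟨hco.1, by omega, hco.2.2⟩
              rw [if_neg h3, if_neg h4]
      · by_cases h : i = m
        · have hC : i < m + 1 ∧ pvBad board nums i i = true := ⟨by omega, h ▸ hb⟩
          rw [if_pos h, if_pos hC]
        · rw [if_neg h]
          by_cases h5 : i < m ∧ pvBad board nums i i = true
          · have h6 : i < m + 1 ∧ pvBad board nums i i = true := ⟨by omega, h5.2⟩
            rw [if_pos h5, if_pos h6]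
          · have h6 : ¬ (i < m + 1 ∧ pvBad board nums i i = true) := by
              intro hco
              exact h5 ⟨by omega, hco.2⟩
            rw [if_neg h5, if_neg h6]
      · by_cases h : i + m = n - 1
        · have hm2 : n - 1 - i = m := by omega
          have hC : n - 1 - i < m + 1 ∧ pvBad board nums i (n - 1 - i) = true :=
            ⟨by omega, hm2 ▸ hb⟩
          rw [if_pos h, if_pos hC]
        · have h2 : ¬ (n - 1 - i = m) := by omega
          rw [if_neg h]
          by_cases h5 : n - 1 - i < m ∧ pvBad board nums i (n - 1 - i) = true
          · have h6 : n - 1 - i < m + 1 ∧ pvBad board nums i (n - 1 - i) = true :=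
              ⟨by omega, h5.2⟩
            rw [if_pos h5, if_pos h6]
          · have h6 : ¬ (n - 1 - i < m + 1 ∧ pvBad board nums i (n - 1 - i) = true) := by
              intro hco
              exact h5 ⟨by omega, hco.2⟩
            rw [if_neg h5, if_neg h6]
    · have hc : nums.contains ((board.getD i []).getD m 0) = true := by
        unfold pvBad at hb; simpa using hb
      have hb' : pvBad board nums i m = false := by simpa using hb
      have hany : (List.range m ++ [m]).any (pvBad board nums i)
          = (List.range m).any (pvBad board nums i) := by
        simp [hb']
      unfold solStep
      simp only [hc, if_true]
      refine congrArg₂ _ ?_ (congrArg₂ _ ?_ ?_)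
      · apply List.map_congr_left
        intro t _
        rw [hany]
        refine if_congr Iff.rfl rfl (if_congr ?_ rfl rfl)
        constructor
        · intro ⟨a, b, c⟩; exact ⟨a, by omega, c⟩
        · intro ⟨a, b, c⟩
          refine ⟨a, ?_, c⟩
          by_cases h5 : t - n = m
          · rw [h5, hb'] at c; cases c
          · omega
      · refine if_congr ?_ rfl rfl
        constructor
        · intro ⟨a, b⟩; exact ⟨by omega, b⟩
        · intro ⟨a, b⟩
          refine ⟨?_, b⟩
          by_cases h5 : i = m
          · exfalso; rw [h5] at b hb'; rw [hb'] at b; cases b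
          · omega
      · refine if_congr ?_ rfl rfl
        constructor
        · intro ⟨a, b⟩; exact ⟨by omega, b⟩
        · intro ⟨a, b⟩
          refine ⟨?_, b⟩
          by_cases h5 : n - 1 - i = m
          · exfalso; rw [h5, hb'] at b; cases b
          · omega

lemma outer_char (board : List (List Int)) (nums : List Int) (n : Nat) (k : Nat) (hk : k ≤ n) :
    (List.range k).foldl
        (fun st i => (List.range n).foldl (solStep board nums n i) st)
        ((List.range (2 * n)).map (fun _ => (1 : Int)), 1, 1)
      = ((List.range (2 * n)).map (fun t =>
            if t < n then (if t < k ∧ (List.range n).any (pvBad board nums t) then 0 else 1)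
            else (if (List.range k).any (fun i => pvBad board nums i (t - n)) then 0 else 1)),
          (if (List.range k).any (fun i => pvBad board nums i i) then 0 else 1),
          (if (List.range k).any (fun i => pvBad board nums i (n - 1 - i)) then 0 else 1)) := by
  induction k with
  | zero => simp
  | succ k ih =>
    have hk' : k ≤ n := by omega
    rw [List.range_succ, List.foldl_append, ih hk']
    simp only [List.foldl_cons, List.foldl_nil]
    rw [inner_char board nums n k (by omega) _ _ _ n (le_refl n)]
    have hsucc : ∀ p : Nat → Bool, (List.range k ++ [k]).any p = ((List.range k).any p || p k) := by
      intro p; simp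
    refine congrArg₂ _ ?_ (congrArg₂ _ ?_ ?_)
    · apply List.map_congr_left
      intro t ht
      simp only [List.mem_range] at ht
      by_cases h1 : t < n
      · have h2 : ¬ (n ≤ t ∧ t - n < n ∧ pvBad board nums k (t - n) = true) :=
          fun hco => by omega
        rw [if_neg h2, if_pos h1, if_pos h1]
        by_cases h3 : t = k
        · by_cases h4 : (List.range n).any (pvBad board nums t) = true
          · have hA : t = k ∧ (List.range n).any (pvBad board nums k) = true := ⟨h3, h3 ▸ h4⟩
            have hB : t < k + 1 ∧ (List.range n).any (pvBad board nums t) = true := ⟨by omega, h4⟩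
            rw [if_pos hA, if_pos hB]
          · have hA : ¬ (t = k ∧ (List.range n).any (pvBad board nums k) = true) :=
              fun hco => h4 (h3 ▸ hco.2)
            have hB : ¬ (t < k ∧ (List.range n).any (pvBad board nums t) = true) :=
              fun hco => h4 hco.2
            have hC : ¬ (t < k + 1 ∧ (List.range n).any (pvBad board nums t) = true) :=
              fun hco => h4 hco.2
            rw [if_neg hA, if_neg hB, if_neg hC]
        · have hA : ¬ (t = k ∧ (List.range n).any (pvBad board nums k) = true) :=
            fun hco => h3 hco.1
          rw [if_neg hA]
          by_cases h5 : t < k ∧ (List.range n).any (pvBad board nums t) = true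
          · have h6 : t < k + 1 ∧ (List.range n).any (pvBad board nums t) = true :=
              ⟨by omega, h5.2⟩
            rw [if_pos h5, if_pos h6]
          · have h6 : ¬ (t < k + 1 ∧ (List.range n).any (pvBad board nums t) = true) := by
              intro hco
              refine h5 ⟨?_, hco.2⟩
              omega
            rw [if_neg h5, if_neg h6]
      · have h2 : n ≤ t := by omega
        have hA : ¬ (t = k ∧ (List.range n).any (pvBad board nums k) = true) :=
          fun hco => by omega
        rw [if_neg hA, if_neg h1, if_neg h1, hsucc]
        by_cases h5 : pvBad board nums k (t - n) = true
        · have hB : n ≤ t ∧ t - n < n ∧ pvBad board nums k (t - n) = true :=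
            ⟨h2, by omega, h5⟩
          have hC : ((List.range k).any (fun i => pvBad board nums i (t - n))
              || pvBad board nums k (t - n)) = true := by simp [h5]
          rw [if_pos hB, if_pos hC]
        · have hB : ¬ (n ≤ t ∧ t - n < n ∧ pvBad board nums k (t - n) = true) :=
            fun hco => h5 hco.2.2
          have h6 : pvBad board nums k (t - n) = false := by simpa using h5
          rw [if_neg hB, h6]
          exact (if_congr (by simp) rfl rfl)
    · rw [hsucc]
      by_cases h : pvBad board nums k k = true
      · have hB : ((List.range k).any (fun i => pvBad board nums i i) || pvBad board nums k k)
            = true := by simp [h]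
        rw [if_pos ⟨by omega, h⟩, if_pos hB]
      · have h' : pvBad board nums k k = false := by simpa using h
        rw [if_neg (fun hco => h hco.2), h']
        exact (if_congr (by simp) rfl rfl)
    · rw [hsucc]
      by_cases h : pvBad board nums k (n - 1 - k) = true
      · have hB : ((List.range k).any (fun i => pvBad board nums i (n - 1 - i))
            || pvBad board nums k (n - 1 - k)) = true := by simp [h]
        rw [if_pos ⟨by omega, h⟩, if_pos hB]
      · have h' : pvBad board nums k (n - 1 - k) = false := by simpa using h
        rw [if_neg (fun hco => h hco.2), h']
        exact (if_congr (by simp) rfl rfl)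

lemma countP_cast_sum (p : Nat → Bool) (l : List Nat) :
    ((l.countP p : Nat) : Int) = (l.map (fun x => if p x then (1 : Int) else 0)).sum := by
  induction l with
  | nil => simp
  | cons a l ih =>
    rw [List.countP_cons]
    by_cases h : p a
    · simp [h, ih]
      ring
    · simp [h, ih]

lemma if_not_any (p : Nat → Bool) (l : List Nat) :
    (if l.any (fun x => !(p x)) then (0 : Int) else 1) = (if l.all p then 1 else 0) := by
  by_cases h : l.all p = true
  · have : l.any (fun x => !(p x)) = false := by
      simp only [List.any_eq_false]
      intro x hx
      simp [List.all_eq_true.mp h x hx]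
    simp [h, this]
  · have h2 : l.any (fun x => !(p x)) = true := by
      simp only [List.all_eq_true, not_forall] at h
      obtain ⟨x, hx, hpx⟩ := h
      simp only [List.any_eq_true]
      exact ⟨x, hx, by simpa using hpx⟩
    simp [h, h2]

-- ===== VERDICT (by name: the statement is the Claim_ definition above) =====
theorem solution_spec : Claim_equal_solution := by
  intro board nums _ _
  unfold Spec_solution solution solution_alt
  have hrep : (List.replicate (2 * board.length) (1 : Int))
      = (List.range (2 * board.length)).map (fun _ => (1 : Int)) := by
    simp [List.map_const']
  simp only [hrep]
  rw [outer_char board nums board.length board.length (le_refl _)]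
  set n := board.length with hn
  have hsplit : List.range (2 * n) = List.range n ++ (List.range n).map (fun t => n + t) := by
    have : 2 * n = n + n := by omega
    rw [this, List.range_add]
  rw [hsplit]
  simp only [List.map_append, List.sum_append, List.map_map]
  have hrow : ((List.range n).map (fun t =>
      if t < n then (if t < n ∧ (List.range n).any (pvBad board nums t) then 0 else 1)
      else (if (List.range n).any (fun i => pvBad board nums i (t - n)) then 0 else (1:Int)))).sum
      = ((List.range n).countP (fun i => (List.range n).all
          (fun j => nums.contains ((board.getD i []).getD j 0))) : Int) := by
    rw [countP_cast_sum]
    apply congrArg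
    apply List.map_congr_left
    intro t ht
    simp only [List.mem_range] at ht
    simp only [ht, if_true, true_and]
    have := if_not_any (fun j => nums.contains ((board.getD t []).getD j 0)) (List.range n)
    simpa [pvBad] using this
  rw [hrow]
  have hcol : ((List.range n).map ((fun t =>
      if t < n then (if t < n ∧ (List.range n).any (pvBad board nums t) then 0 else 1)
      else (if (List.range n).any (fun i => pvBad board nums i (t - n)) then 0 else (1:Int)))
        ∘ (fun t => n + t))).sum
      = ((List.range n).countP (fun j => (List.range n).all
          (fun i => nums.contains ((board.getD i []).getD j 0))) : Int) := by
    rw [countP_cast_sum]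
    apply congrArg
    apply List.map_congr_left
    intro t ht
    simp only [List.mem_range] at ht
    simp only [Function.comp]
    have h1 : ¬ (n + t < n) := by omega
    have h2 : n + t - n = t := by omega
    simp only [h1, if_false, h2]
    have := if_not_any (fun i => nums.contains ((board.getD i []).getD t 0)) (List.range n)
    simpa [pvBad] using this
  rw [hcol]
  have hd1 := if_not_any (fun i => nums.contains ((board.getD i []).getD i 0)) (List.range n)
  have hd2 := if_not_any (fun i => nums.contains ((board.getD i []).getD (n - 1 - i) 0)) (List.range n)
  exact congrArg₂ (· + ·) (congrArg₂ (· + ·) rfl hd1) hd2
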